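-- pv_equiv track=rewrite | github.com/OpenPecha/ie-datasets | SOAS_2_lighttag.py | merge_spaces
-- ===== SOURCE A (Python) =====
-- def merge_spaces(tokens):
--     out = []
--     for t in tokens:
--         if t == '_':
--             if not out:
--                 out.append(t)
--             else:
--                 out[-1] = out[-1] + t
--         else:
--             out.append(t)
--     return out
-- ===== SOURCE B (Python) =====
-- def merge_spaces(tokens):
--     out = []
--     i = 0
--     n = len(tokens)
--     while i < n:
--         j = i + 1
--         if tokens[i] == '_':
--             while j < n and tokens[j] == '_':
--                 j += 1
--             run = '_' * (j - i)
--             if out: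
--                 out[-1] += run
--             else:
--                 out.append(run)
--         else:
--             while j < n and tokens[j] != '_':
--                 j += 1
--             out.extend(tokens[i:j])
--         i = j
--     return out
-- ===== Notes on version B (the rewrite author's own statement) =====
-- stated objective: alternative
-- what changed: B scans the input run by run with two pointers (a whole maximal underscore run is built as one string and attached in a single step, non-underscore runs are extended in one slice), instead of A's per-token loop that grows out[-1] one underscore at a time.
import Mathlib
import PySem

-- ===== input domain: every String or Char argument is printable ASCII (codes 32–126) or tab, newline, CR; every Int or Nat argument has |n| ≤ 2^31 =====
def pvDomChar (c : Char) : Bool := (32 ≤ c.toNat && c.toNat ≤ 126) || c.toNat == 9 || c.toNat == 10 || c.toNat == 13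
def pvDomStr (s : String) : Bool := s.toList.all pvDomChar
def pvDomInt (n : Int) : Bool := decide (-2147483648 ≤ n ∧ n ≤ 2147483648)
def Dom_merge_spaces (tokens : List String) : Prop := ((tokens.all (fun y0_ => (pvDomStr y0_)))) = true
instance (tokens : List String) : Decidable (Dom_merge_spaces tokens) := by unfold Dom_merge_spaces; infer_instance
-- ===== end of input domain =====

-- B merges each maximal run of underscores in one step (two-pointer run scan) instead of
-- A's per-token loop; same return value everywhere ("alternative" decomposition, no speed claim).

-- ===== PORT A =====
-- out is kept reversed (Python append = cons); reversed at the end.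
def msStepA (rout : List String) (t : String) : List String :=
  if t == "_" then
    match rout with
    | [] => [t]
    | h :: rest => (h ++ t) :: rest
  else t :: rout

def merge_spaces (tokens : List String) : List String :=
  (tokens.foldl msStepA []).reverse

-- ===== PORT B =====
-- '_' * k of Source B, ported by hand (exact: k copies of "_")
def repUS : Nat → String
  | 0 => ""
  | n + 1 => "_" ++ repUS n

-- the outer while of Source B: recursion on the unprocessed suffix; the inner whiles are
-- takeWhile/dropWhile over that suffix; out kept reversed (append/extend = cons/reverse-append).
def msRunB (tokens : List String) (rout : List String) : List String :=
  match tokens with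
  | [] => rout
  | t :: rest =>
    if t == "_" then
      let run := rest.takeWhile (fun x => x == "_")
      let s := repUS (run.length + 1)
      msRunB (rest.dropWhile (fun x => x == "_"))
        (match rout with
         | [] => [s]
         | h :: hs => (h ++ s) :: hs)
    else
      let run := rest.takeWhile (fun x => x != "_")
      msRunB (rest.dropWhile (fun x => x != "_")) ((t :: run).reverse ++ rout)
  termination_by tokens.length
  decreasing_by
  · exact Nat.lt_succ_of_le (List.length_dropWhile_le _ _)
  · exact Nat.lt_succ_of_le (List.length_dropWhile_le _ _)

def merge_spaces_alt (tokens : List String) : List String :=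
  (msRunB tokens []).reverse

-- ===== PRECONDITION & SPEC =====
def Spec_merge_spaces (tokens : List String) (out : List String) : Prop := out = merge_spaces_alt tokens
instance (tokens : List String) (out : List String) : Decidable (Spec_merge_spaces tokens out) := by unfold Spec_merge_spaces; infer_instance

-- ===== CLAIM (what is proved, stated in full; the proofs are below) =====
def Claim_equal_merge_spaces : Prop := ∀ (tokens : List String), Dom_merge_spaces tokens → Spec_merge_spaces tokens (merge_spaces tokens)

-- ===== LEMMAS AND PROOFS =====

-- folding A's step over a run of underscores, starting from a nonempty accumulator,
-- appends the whole run to the head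
theorem foldl_stepA_us (n : Nat) (h : String) (hs : List String) :
    (List.replicate n "_").foldl msStepA (h :: hs) = (h ++ repUS n) :: hs := by
  induction n generalizing h with
  | zero => simp [repUS]
  | succ k ih =>
      simp only [List.replicate_succ, List.foldl_cons]
      have : msStepA (h :: hs) "_" = (h ++ "_") :: hs := by simp [msStepA]
      rw [this, ih]
      simp [repUS, String.append_assoc]

-- folding A's step over non-underscore tokens conses them all
theorem foldl_stepA_ns (l : List String) (acc : List String)
    (hl : ∀ x ∈ l, (x == "_") = false) :
    l.foldl msStepA acc = l.reverse ++ acc := by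
  induction l generalizing acc with
  | nil => simp
  | cons t rest ih =>
      have ht : (t == "_") = false := hl t (by simp)
      simp only [List.foldl_cons, List.reverse_cons]
      rw [show msStepA acc t = t :: acc by simp [msStepA, ht], ih _ (fun x hx => hl x (by simp [hx]))]
      simp

theorem msRunB_eq_foldl (tokens : List String) (rout : List String) :
    msRunB tokens rout = tokens.foldl msStepA rout := by
  induction hn : tokens.length using Nat.strong_induction_on generalizing tokens rout with
  | _ n ih =>
  match tokens with
  | [] => simp [msRunB]
  | t :: rest =>
    rw [msRunB]
    by_cases ht : t = "_"
    · subst ht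
      simp only [beq_self_eq_true, if_true]
      set run := rest.takeWhile (fun x => x == "_") with hrun
      set rest' := rest.dropWhile (fun x => x == "_") with hrest'
      have hsplit : rest = run ++ rest' := (List.takeWhile_append_dropWhile).symm
      have hrep : run = List.replicate run.length "_" := by
        rw [List.eq_replicate_iff]
        exact ⟨rfl, fun b hb => by simpa using List.mem_takeWhile_imp hb⟩
      have hlen : rest'.length < n := by
        subst hn
        exact Nat.lt_succ_of_le (List.length_dropWhile_le _ _)
      rw [ih rest'.length hlen rest' _ rfl]
      have hfold : (List.foldl msStepA rout ("_" :: rest)) =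
          List.foldl msStepA
            (match rout with
             | [] => [repUS (run.length + 1)]
             | h :: hs => (h ++ repUS (run.length + 1)) :: hs) rest' := by
        conv_lhs => rw [show ("_" :: rest) = ("_" :: run) ++ rest' by simp [hsplit]]
        rw [List.foldl_append]
        congr 1
        simp only [List.foldl_cons]
        conv_lhs => rw [hrep]
        match rout with
        | [] =>
            rw [show msStepA [] "_" = ["_"] by simp [msStepA]]
            rw [foldl_stepA_us]
            show ["_" ++ repUS run.length] = [repUS (run.length + 1)]
            rw [show repUS (run.length + 1) = "_" ++ repUS run.length from rfl]
        | h :: hs =>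
            rw [show msStepA (h :: hs) "_" = (h ++ "_") :: hs by simp [msStepA]]
            rw [foldl_stepA_us]
            show (h ++ "_" ++ repUS run.length) :: hs = (h ++ repUS (run.length + 1)) :: hs
            rw [show repUS (run.length + 1) = "_" ++ repUS run.length from rfl, String.append_assoc]
      rw [← hfold]
    · have htb : (t == "_") = false := by simpa using ht
      simp only [htb, Bool.false_eq_true, if_false]
      set run := rest.takeWhile (fun x => x != "_") with hrun
      set rest' := rest.dropWhile (fun x => x != "_") with hrest'
      have hsplit : rest = run ++ rest' := (List.takeWhile_append_dropWhile).symm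
      have hlen : rest'.length < n := by
        subst hn
        exact Nat.lt_succ_of_le (List.length_dropWhile_le _ _)
      rw [ih rest'.length hlen rest' _ rfl]
      conv_rhs => rw [show (t :: rest) = (t :: run) ++ rest' by simp [hsplit]]
      rw [List.foldl_append]
      congr 1
      refine (foldl_stepA_ns (t :: run) rout ?_).symm
      intro x hx
      rcases List.mem_cons.mp hx with h | h
      · subst h; exact htb
      · simpa using List.mem_takeWhile_imp h

-- ===== VERDICT (by name: the statement is the Claim_ definition above) =====
theorem merge_spaces_spec : Claim_equal_merge_spaces := by
  intro tokens _
  unfold Spec_merge_spaces merge_spaces merge_spaces_alt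
  rw [msRunB_eq_foldl]
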